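-- pv_equiv track=rewrite | github.com/aperfilev/leetcode-problems | python3/src/text-justification.py | getMinimalLineWidth
-- ===== SOURCE A (Python) =====
-- def getMinimalLineWidth(words):
--     width = 0
--     if len(words) > 0:
--         width += len(words[0])
--         for i in range(1, len(words)):
--             width += 1
--             width += len(words[i])
--
--     return width
-- ===== SOURCE B (Python) =====
-- def getMinimalLineWidth(words):
--     # Divide and conquer: joining the two halves with single spaces costs
--     # exactly one extra separator between the halves.
--     if not words:
--         return 0
--     if len(words) == 1:
--         return len(words[0])
--     mid = len(words) // 2
--     return getMinimalLineWidth(words[:mid]) + 1 + getMinimalLineWidth(words[mid:])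
-- ===== Notes on version B (the rewrite author's own statement) =====
-- stated objective: alternative
-- what changed: Replaces A's left-to-right index loop with a divide-and-conquer recursion: split the list at the midpoint, solve each half, and add one separator for the join between the halves.
import Mathlib
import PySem

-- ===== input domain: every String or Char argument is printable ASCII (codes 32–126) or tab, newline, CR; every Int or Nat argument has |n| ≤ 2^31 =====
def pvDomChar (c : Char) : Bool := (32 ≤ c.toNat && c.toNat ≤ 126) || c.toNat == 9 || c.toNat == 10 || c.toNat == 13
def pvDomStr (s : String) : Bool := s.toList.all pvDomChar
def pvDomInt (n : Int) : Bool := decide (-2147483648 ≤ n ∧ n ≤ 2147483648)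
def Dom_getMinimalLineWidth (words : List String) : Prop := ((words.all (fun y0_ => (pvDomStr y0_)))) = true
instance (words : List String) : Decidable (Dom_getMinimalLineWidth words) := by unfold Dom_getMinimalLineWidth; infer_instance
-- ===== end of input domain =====

-- B replaces A's left-to-right index loop with a divide-and-conquer split at the midpoint (one separator joins the halves); alternative decomposition, same result.


-- ===== PORT A =====
def getMinimalLineWidth (words : List String) : Int :=
  let width : Int := 0
  if words.length > 0 then
    let width := width + PySem.Str.len (PySem.List.pyGetD words 0 "")
    List.foldl (fun w i => w + 1 + PySem.Str.len (PySem.List.pyGetD words i ""))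
      width (PySem.List.pyRange 1 (PySem.List.len words))
  else width

-- ===== PORT B =====
-- 'mid = len(words) // 2': the length is a Nat, so Python's floor division is Nat division here (exact).
def getMinimalLineWidth_alt (words : List String) : Int :=
  if _h0 : words.length = 0 then 0          -- 'if not words: return 0'
  else if _h1 : words.length = 1 then PySem.Str.len (PySem.List.pyGetD words 0 "")
  else
    getMinimalLineWidth_alt (PySem.List.slice words none (some ((words.length / 2 : Nat) : Int))) + 1 +
    getMinimalLineWidth_alt (PySem.List.slice words (some ((words.length / 2 : Nat) : Int)) none)
termination_by words.length
decreasing_by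
  · rw [PySem.List.slice_to_natCast]; simp; omega
  · rw [PySem.List.slice_from_natCast]; simp; omega

-- ===== PRECONDITION & SPEC =====
def Spec_getMinimalLineWidth (words : List String) (out : Int) : Prop := out = getMinimalLineWidth_alt words
instance (words : List String) (out : Int) : Decidable (Spec_getMinimalLineWidth words out) := by unfold Spec_getMinimalLineWidth; infer_instance

-- ===== CLAIM (what is proved, stated in full; the proofs are below) =====
def Claim_equal_getMinimalLineWidth : Prop := ∀ (words : List String), Dom_getMinimalLineWidth words → Spec_getMinimalLineWidth words (getMinimalLineWidth words)

-- ===== LEMMAS AND PROOFS =====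

-- closed form both programs compute on a nonempty list
def pvLineW (ws : List String) : Int := (ws.map PySem.Str.len).sum + ws.length - 1

theorem pv_alt_eq (ws : List String) (h : ws ≠ []) : getMinimalLineWidth_alt ws = pvLineW ws := by
  induction ws using getMinimalLineWidth_alt.induct with
  | case1 ws h0 =>
    exact absurd (List.length_eq_zero_iff.mp h0) h
  | case2 ws h0 h1 =>
    obtain ⟨w, rfl⟩ := List.length_eq_one_iff.mp h1
    simp [getMinimalLineWidth_alt, pvLineW, PySem.List.pyGetD_zero_cons]
  | case3 ws h0 h1 ih1 ih2 =>
    have hn : 2 ≤ ws.length := by omega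
    rw [getMinimalLineWidth_alt]
    simp only [h0, h1, dite_false]
    rw [PySem.List.slice_to_natCast, PySem.List.slice_from_natCast] at *
    rw [ih1 (by rw [← List.length_pos_iff]; simp; omega),
        ih2 (by rw [← List.length_pos_iff]; simp; omega)]
    unfold pvLineW
    have hsum : ((ws.take (ws.length / 2)).map PySem.Str.len).sum
        + ((ws.drop (ws.length / 2)).map PySem.Str.len).sum = (ws.map PySem.Str.len).sum := by
      rw [← List.sum_append, ← List.map_append, List.take_append_drop]
    simp only [List.length_take, List.length_drop, Nat.min_eq_left (Nat.div_le_self _ 2)]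
    have hc : ((ws.length - ws.length / 2 : Nat) : Int) = (ws.length : Int) - ((ws.length / 2 : Nat) : Int) := by omega
    rw [hc, ← hsum]
    ring

theorem pv_foldA (ws : List String) : ∀ (acc : Int),
    List.foldl (fun a s => a + 1 + PySem.Str.len s) acc ws
      = acc + (ws.map PySem.Str.len).sum + ws.length := by
  induction ws with
  | nil => intro acc; simp
  | cons w rest ih =>
    intro acc
    simp only [List.foldl_cons, List.map_cons, List.sum_cons, List.length_cons]
    rw [ih]
    push_cast
    ring

-- ===== VERDICT (by name: the statement is the Claim_ definition above) =====
theorem getMinimalLineWidth_spec : Claim_equal_getMinimalLineWidth := by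
  intro words _
  unfold Spec_getMinimalLineWidth getMinimalLineWidth
  cases words with
  | nil => simp [getMinimalLineWidth_alt]
  | cons w ws =>
    rw [pv_alt_eq (w :: ws) (by simp)]
    simp only [List.length_cons, if_pos (Nat.succ_pos ws.length)]
    rw [PySem.List.foldl_pyRange_pyGetD (w :: ws) "" (fun a s => a + 1 + PySem.Str.len s)
        (0 + PySem.Str.len (PySem.List.pyGetD (w :: ws) 0 "")) (by norm_num)]
    simp only [Int.toNat_one, List.drop_succ_cons, List.drop_zero]
    rw [pv_foldA, PySem.List.pyGetD_zero_cons]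
    unfold pvLineW
    simp
    ring
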